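-- pv_equiv track=rewrite | github.com/IsaiasBrazil/beecrowd | 1435.py | matriz_quadrada
-- ===== SOURCE A (Python) =====
-- def matriz_quadrada(t):
--     m=[[0 for x in range (t)] for x in range(t)]
--     s=""
--     for j in range(t):
--         for k in range(j,t-j):
--             m[j][k]=j+1
--             m[k][j] =j+1
--             m[t-j-1][k]=j+1
--             m[k][t-j-1]=j+1
--         for i in range(t):
--             s+= "  "+str(m[j][i]) if m[j][i]<10 else " " +str(m[j][i])
--             if i < t-1:
--                 s+=" "
--         s+="\n"
--     return s
-- ===== SOURCE B (Python) =====
-- def matriz_quadrada(t):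
--     rows = []
--     for i in range(t):
--         cells = []
--         for j in range(t):
--             v = min(i, j, t - 1 - i, t - 1 - j) + 1
--             cells.append(("  " if v < 10 else " ") + str(v))
--         rows.append(" ".join(cells) + "\n")
--     return "".join(rows)
-- ===== Notes on version B (the rewrite author's own statement) =====
-- stated objective: simpler
-- what changed: B drops A's mutable square matrix and its four-sided border-sweep fill entirely, computing each cell directly as a closed form of its minimum distance to the four borders and joining the formatted cells with str.join.
import Mathlib
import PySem

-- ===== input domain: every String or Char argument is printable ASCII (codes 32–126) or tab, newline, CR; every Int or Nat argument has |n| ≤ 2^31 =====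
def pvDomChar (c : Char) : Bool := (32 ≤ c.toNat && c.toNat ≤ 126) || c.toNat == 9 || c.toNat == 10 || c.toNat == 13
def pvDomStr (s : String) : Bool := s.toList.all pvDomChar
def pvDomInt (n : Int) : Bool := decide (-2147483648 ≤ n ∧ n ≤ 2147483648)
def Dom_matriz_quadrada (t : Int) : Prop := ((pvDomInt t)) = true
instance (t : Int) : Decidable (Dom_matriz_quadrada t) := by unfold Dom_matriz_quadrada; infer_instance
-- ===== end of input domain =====

-- B replaces A's four-sided border-sweep fill of a mutable square matrix by a direct per-cell
-- closed form of the cell's minimum distance to the four borders, joining the formatted cells (objective: simpler).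

-- ===== PORT A =====
-- m[a][b] = v  (indices are always in range where A executes this, so the total pySetD/pyGetD forms are exact)
def setCell (m : List (List Int)) (a b v : Int) : List (List Int) :=
  PySem.List.pySetD m a (PySem.List.pySetD (PySem.List.pyGetD m a []) b v)

-- body of 'for k in range(j, t-j)': the four border assignments
def fillK (t j : Int) (m : List (List Int)) (k : Int) : List (List Int) :=
  setCell (setCell (setCell (setCell m j k (j + 1)) k j (j + 1)) (t - j - 1) k (j + 1)) k (t - j - 1) (j + 1)

-- cell text: "  "+str(m[j][i]) if m[j][i]<10 else " "+str(m[j][i])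
def cellA (m : List (List Int)) (j i : Int) : String :=
  let v := PySem.List.pyGetD (PySem.List.pyGetD m j []) i 0
  if v < 10 then "  " ++ PySem.Int.toStr v else " " ++ PySem.Int.toStr v

-- body of 'for i in range(t)'
def rowStep (t : Int) (m : List (List Int)) (j : Int) (s : String) (i : Int) : String :=
  let s := s ++ cellA m j i
  if i < t - 1 then s ++ " " else s

def rowStr (t : Int) (m : List (List Int)) (j : Int) (s : String) : String :=
  (PySem.List.pyRange 0 t 1).foldl (rowStep t m j) s

-- body of 'for j in range(t)' over the state (m, s)
def stepA (t : Int) (st : List (List Int) × String) (j : Int) : List (List Int) × String :=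
  let m := (PySem.List.pyRange j (t - j) 1).foldl (fillK t j) st.1
  (m, rowStr t m j st.2 ++ "\n")

-- m = [[0 for x in range(t)] for x in range(t)]
def m0 (t : Int) : List (List Int) :=
  (PySem.List.pyRange 0 t 1).map (fun _ => (PySem.List.pyRange 0 t 1).map (fun _ => (0 : Int)))

def matriz_quadrada (t : Int) : String :=
  ((PySem.List.pyRange 0 t 1).foldl (stepA t) (m0 t, "")).2

-- ===== PORT B =====
def cellB (t i j : Int) : String :=
  let v := min (min i j) (min (t - 1 - i) (t - 1 - j)) + 1
  (if v < 10 then "  " else " ") ++ PySem.Int.toStr v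

def rowB (t i : Int) : String :=
  PySem.Str.join " " ((PySem.List.pyRange 0 t 1).map (cellB t i)) ++ "\n"

def matriz_quadrada_alt (t : Int) : String :=
  PySem.Str.join "" ((PySem.List.pyRange 0 t 1).map (rowB t))

-- ===== PRECONDITION & SPEC =====
def Spec_matriz_quadrada (t : Int) (out : String) : Prop := out = matriz_quadrada_alt t
instance (t : Int) (out : String) : Decidable (Spec_matriz_quadrada t out) := by unfold Spec_matriz_quadrada; infer_instance

-- ===== CLAIM (what is proved, stated in full; the proofs are below) =====
def Claim_equal_matriz_quadrada : Prop := ∀ (t : Int), Dom_matriz_quadrada t → Spec_matriz_quadrada t (matriz_quadrada t)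

-- ===== LEMMAS AND PROOFS =====

-- proof-side vocabulary
def pvShape (t : Int) (m : List (List Int)) : Prop :=
  m.length = t.toNat ∧ ∀ row ∈ m, row.length = t.toNat

def pvGet2 (m : List (List Int)) (r c : Int) : Int :=
  PySem.List.pyGetD (PySem.List.pyGetD m r []) c 0

def pvLayer (t r c : Int) : Int := min (min r c) (min (t - 1 - r) (t - 1 - c))

lemma getD_set {α : Type} (l : List α) (i j : Nat) (v d : α) (h : i < l.length) :
    (l.set i v).getD j d = if j = i then v else l.getD j d := by
  by_cases hj : j = i
  · subst hj; simp [List.getD, h]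
  · have hij : i ≠ j := fun h' => hj h'.symm
    simp [List.getD, hj, hij]

lemma shape_setCell (t : Int) (m : List (List Int)) (a b v : Int) (hm : pvShape t m)
    (ha : 0 ≤ a) (hat : a < t) : pvShape t (setCell m a b v) := by
  obtain ⟨h1, h2⟩ := hm
  constructor
  · rw [setCell, PySem.List.pySetD_of_nonneg _ _ ha, List.length_set]; exact h1
  · intro row hrow
    rw [setCell, PySem.List.pySetD_of_nonneg _ _ ha] at hrow
    rcases List.mem_or_eq_of_mem_set hrow with h | h
    · exact h2 _ h
    · subst h
      rw [PySem.List.length_pySetD, PySem.List.pyGetD_of_nonneg _ _ ha]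
      apply h2
      rw [List.getD_eq_getElem _ _ (by omega)]
      exact List.getElem_mem _

lemma get2_setCell (t : Int) (m : List (List Int)) (a b v r c : Int) (hm : pvShape t m)
    (ha : 0 ≤ a) (hat : a < t) (hb : 0 ≤ b) (hbt : b < t) (hr : 0 ≤ r) (hc : 0 ≤ c) :
    pvGet2 (setCell m a b v) r c = if r = a ∧ c = b then v else pvGet2 m r c := by
  obtain ⟨h1, h2⟩ := hm
  have hlen : a.toNat < m.length := by omega
  have hrowlen : (m.getD a.toNat []).length = t.toNat := by
    apply h2
    rw [List.getD_eq_getElem _ _ (by omega)]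
    exact List.getElem_mem _
  unfold pvGet2 setCell
  rw [PySem.List.pySetD_of_nonneg _ _ ha, PySem.List.pyGetD_of_nonneg _ _ ha,
      PySem.List.pyGetD_of_nonneg _ _ hr, PySem.List.pyGetD_of_nonneg _ _ hr,
      getD_set _ _ _ _ _ hlen]
  by_cases hra : r = a
  · subst hra
    rw [if_pos rfl, PySem.List.pySetD_of_nonneg _ _ hb,
        PySem.List.pyGetD_of_nonneg _ _ hc, PySem.List.pyGetD_of_nonneg _ _ hc,
        getD_set _ _ _ _ _ (by omega)]
    by_cases hcb : c = b
    · subst hcb; rw [if_pos (by omega), if_pos ⟨rfl, rfl⟩]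
    · rw [if_neg (by omega), if_neg (by tauto)]
  · rw [if_neg (by omega), if_neg (by tauto)]

lemma shape_fillK (t j : Int) (m : List (List Int)) (k : Int) (hm : pvShape t m)
    (hj : 0 ≤ j) (hjk : j ≤ k) (hkt : k < t - j) : pvShape t (fillK t j m k) := by
  have hb2 : j < t := by omega
  have hb3 : (0:Int) ≤ k := by omega
  have hb4 : k < t := by omega
  have hb5 : (0:Int) ≤ t - j - 1 := by omega
  have hb6 : t - j - 1 < t := by omega
  unfold fillK
  exact shape_setCell t _ k (t-j-1) (j+1)
    (shape_setCell t _ (t-j-1) k (j+1)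
      (shape_setCell t _ k j (j+1)
        (shape_setCell t m j k (j+1) hm hj hb2) hb3 hb4) hb5 hb6) hb3 hb4

lemma get2_fillK (t j : Int) (m : List (List Int)) (k r c : Int) (hm : pvShape t m)
    (hj : 0 ≤ j) (hjk : j ≤ k) (hkt : k < t - j)
    (hr : 0 ≤ r) (hrt : r < t) (hc : 0 ≤ c) (hct : c < t) :
    pvGet2 (fillK t j m k) r c =
      if (r = j ∧ c = k) ∨ (c = j ∧ r = k) ∨ (r = t - j - 1 ∧ c = k) ∨ (c = t - j - 1 ∧ r = k)
      then j + 1 else pvGet2 m r c := by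
  have hb1 : (0:Int) ≤ j := hj
  have hb2 : j < t := by omega
  have hb3 : (0:Int) ≤ k := by omega
  have hb4 : k < t := by omega
  have hb5 : (0:Int) ≤ t - j - 1 := by omega
  have hb6 : t - j - 1 < t := by omega
  have s1 := shape_setCell t m j k (j+1) hm hb1 hb2
  have s2 := shape_setCell t _ k j (j+1) s1 hb3 hb4
  have s3 := shape_setCell t _ (t-j-1) k (j+1) s2 hb5 hb6
  unfold fillK
  rw [get2_setCell t _ k (t-j-1) (j+1) r c s3 hb3 hb4 hb5 hb6 hr hc,
      get2_setCell t _ (t-j-1) k (j+1) r c s2 hb5 hb6 hb3 hb4 hr hc,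
      get2_setCell t _ k j (j+1) r c s1 hb3 hb4 hb1 hb2 hr hc,
      get2_setCell t m j k (j+1) r c hm hb1 hb2 hb3 hb4 hr hc]
  split_ifs <;> first | rfl | omega

lemma get2_fillFold (t j : Int) (hj : 0 ≤ j) :
    ∀ (ks : List Int) (m : List (List Int)), (∀ k ∈ ks, j ≤ k ∧ k < t - j) → pvShape t m →
    pvShape t (ks.foldl (fillK t j) m) ∧
    ∀ r c, 0 ≤ r → r < t → 0 ≤ c → c < t →
      pvGet2 (ks.foldl (fillK t j) m) r c =
        if (∃ k ∈ ks, (r = j ∧ c = k) ∨ (c = j ∧ r = k) ∨ (r = t - j - 1 ∧ c = k) ∨ (c = t - j - 1 ∧ r = k))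
        then j + 1 else pvGet2 m r c := by
  intro ks
  induction ks with
  | nil =>
    intro m _ hm
    refine ⟨hm, fun r c _ _ _ _ => ?_⟩
    simp
  | cons k ks ih =>
    intro m hks hm
    obtain ⟨hk1, hk2⟩ := hks k (List.mem_cons_self ..)
    have hm' := shape_fillK t j m k hm hj hk1 hk2
    obtain ⟨ihs, ihg⟩ := ih (fillK t j m k) (fun k' hk' => hks k' (List.mem_cons_of_mem _ hk')) hm'
    simp only [List.foldl_cons]
    refine ⟨ihs, ?_⟩
    intro r c hr hrt hc hct
    rw [ihg r c hr hrt hc hct, get2_fillK t j m k r c hm hj hk1 hk2 hr hrt hc hct]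
    by_cases hA : ∃ x ∈ ks, (r = j ∧ c = x) ∨ (c = j ∧ r = x) ∨ (r = t - j - 1 ∧ c = x) ∨ (c = t - j - 1 ∧ r = x)
    · rw [if_pos hA, if_pos (by obtain ⟨x, hx, hW⟩ := hA; exact ⟨x, List.mem_cons_of_mem _ hx, hW⟩)]
    · rw [if_neg hA]
      by_cases hB : (r = j ∧ c = k) ∨ (c = j ∧ r = k) ∨ (r = t - j - 1 ∧ c = k) ∨ (c = t - j - 1 ∧ r = k)
      · rw [if_pos hB, if_pos ⟨k, List.mem_cons_self .., hB⟩]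
      · rw [if_neg hB, if_neg (by rintro ⟨x, hx, hW⟩; rcases List.mem_cons.mp hx with rfl | hx'; exact hB hW; exact hA ⟨x, hx', hW⟩)]

lemma written_iff_layer (t j r c : Int) (hj : 0 ≤ j)
    (hr : 0 ≤ r) (hrt : r < t) (hc : 0 ≤ c) (hct : c < t) :
    (∃ k ∈ PySem.List.pyRange j (t - j) 1,
        (r = j ∧ c = k) ∨ (c = j ∧ r = k) ∨ (r = t - j - 1 ∧ c = k) ∨ (c = t - j - 1 ∧ r = k))
      ↔ pvLayer t r c = j := by
  constructor
  · rintro ⟨k, hk, hW⟩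
    rw [PySem.List.mem_pyRange_one] at hk
    unfold pvLayer
    omega
  · intro hl
    unfold pvLayer at hl
    by_cases hcase : r = j ∨ r = t - j - 1
    · exact ⟨c, by rw [PySem.List.mem_pyRange_one]; omega, by omega⟩
    · exact ⟨r, by rw [PySem.List.mem_pyRange_one]; omega, by omega⟩

-- string-join helpers at the String level
lemma sjoin_nil (sep : String) : PySem.Str.join sep [] = "" := by
  simp [PySem.Str.join, PySem.Chars.join_nil]

lemma sjoin_singleton (sep p : String) : PySem.Str.join sep [p] = p := by
  simp [PySem.Str.join, PySem.Chars.join_singleton, String.ofList_toList]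

lemma sjoin_cons_cons (sep p q : String) (rest : List String) :
    PySem.Str.join sep (p :: q :: rest) = p ++ sep ++ PySem.Str.join sep (q :: rest) := by
  simp [PySem.Str.join, PySem.Chars.join_cons_cons, String.ofList_append, String.ofList_toList,
    String.append_assoc]

lemma sjoin_empty_append (ps : List String) (p : String) :
    PySem.Str.join "" (ps ++ [p]) = PySem.Str.join "" ps ++ p := by
  induction ps with
  | nil => simp [sjoin_nil, sjoin_singleton]
  | cons x ps ih =>
    cases ps with
    | nil => simp [sjoin_cons_cons, sjoin_singleton]
    | cons y ps' =>
      simp only [List.cons_append, sjoin_cons_cons] at ih ⊢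
      rw [ih]
      simp [String.append_assoc]

lemma rowStr_eq (t : Int) (m : List (List Int)) (j : Int) :
    ∀ (n : Nat) (a : Int) (s : String), t = a + n →
      (PySem.List.pyRange a t 1).foldl (rowStep t m j) s
        = s ++ PySem.Str.join " " ((PySem.List.pyRange a t 1).map (cellA m j)) := by
  intro n
  induction n with
  | zero =>
    intro a s h
    rw [PySem.List.pyRange_one_eq_nil (by omega)]
    simp [sjoin_nil]
  | succ n ih =>
    intro a s h
    push_cast at h
    rw [PySem.List.pyRange_one_cons (by omega : a < t)]
    simp only [List.foldl_cons, List.map_cons]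
    cases n with
    | zero =>
      rw [PySem.List.pyRange_one_eq_nil (by omega : t ≤ a + 1)]
      simp only [List.foldl_nil, List.map_nil]
      rw [sjoin_singleton, rowStep, if_neg (by omega : ¬ a < t - 1)]
    | succ n' =>
      rw [ih (a + 1) (rowStep t m j s a) (by push_cast; omega)]
      rw [PySem.List.pyRange_one_cons (by omega : a + 1 < t)]
      simp only [List.map_cons]
      rw [sjoin_cons_cons, rowStep, if_pos (by omega : a < t - 1)]
      simp [String.append_assoc]

lemma outer_inv (t : Int) (ht : 0 < t) :
    ∀ (u : Nat), (u : Int) ≤ t →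
      pvShape t ((PySem.List.pyRange 0 (u : Int) 1).foldl (stepA t) (m0 t, "")).1 ∧
      (∀ r c, 0 ≤ r → r < t → 0 ≤ c → c < t →
        pvGet2 ((PySem.List.pyRange 0 (u : Int) 1).foldl (stepA t) (m0 t, "")).1 r c
          = if pvLayer t r c < (u : Int) then pvLayer t r c + 1 else 0) ∧
      ((PySem.List.pyRange 0 (u : Int) 1).foldl (stepA t) (m0 t, "")).2
          = PySem.Str.join "" ((PySem.List.pyRange 0 (u : Int) 1).map (rowB t)) := by
  intro u
  induction u with
  | zero =>
    intro _
    simp only [Nat.cast_zero]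
    rw [PySem.List.pyRange_one_eq_nil le_rfl]
    simp only [List.foldl_nil, List.map_nil]
    refine ⟨⟨?_, ?_⟩, ?_, ?_⟩
    · simp [m0, PySem.List.length_pyRange_one]
    · intro row hrow
      simp only [m0, List.mem_map] at hrow
      obtain ⟨x, _, rfl⟩ := hrow
      simp [PySem.List.length_pyRange_one]
    · intro r c hr hrt hc hct
      unfold pvGet2 m0
      rw [PySem.List.pyGetD_map_pyRange_of_nonneg _ t r _ hr hrt,
          PySem.List.pyGetD_map_pyRange_of_nonneg _ t c _ hc hct,
          if_neg (by unfold pvLayer; omega)]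
    · rw [sjoin_nil]
  | succ u ih =>
    intro hu1
    push_cast at hu1
    obtain ⟨ihs, ihg, ihstr⟩ := ih (by omega)
    have hcast : ((u + 1 : Nat) : Int) = (u : Int) + 1 := by push_cast; ring
    rw [hcast, PySem.List.pyRange_one_succ_right (by omega : (0:Int) ≤ (u:Int)),
        List.foldl_append, List.map_append]
    simp only [List.foldl_cons, List.foldl_nil]
    obtain ⟨shp, gtc⟩ := get2_fillFold t u (by omega) (PySem.List.pyRange u (t - u) 1)
      ((PySem.List.pyRange 0 (u:Int) 1).foldl (stepA t) (m0 t, "")).1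
      (fun k hk => PySem.List.mem_pyRange_one.mp hk) ihs
    refine ⟨shp, ?_, ?_⟩
    · intro r c hr hrt hc hct
      simp only [stepA]
      rw [gtc r c hr hrt hc hct]
      have hl0 : 0 ≤ pvLayer t r c := by unfold pvLayer; omega
      by_cases hw : ∃ k ∈ PySem.List.pyRange (↑u) (t - ↑u) 1,
          r = ↑u ∧ c = k ∨ c = ↑u ∧ r = k ∨ r = t - ↑u - 1 ∧ c = k ∨ c = t - ↑u - 1 ∧ r = k
      · have hlay := (written_iff_layer t u r c (by omega) hr hrt hc hct).mp hw
        rw [if_pos hw, if_pos (by omega)]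
        omega
      · have hlay : pvLayer t r c ≠ (u:Int) :=
          fun h => hw ((written_iff_layer t u r c (by omega) hr hrt hc hct).mpr h)
        rw [if_neg hw, ihg r c hr hrt hc hct]
        split_ifs <;> omega
    · simp only [stepA]
      rw [rowStr, rowStr_eq t _ u t.toNat 0
            ((PySem.List.pyRange 0 (u:Int) 1).foldl (stepA t) (m0 t, "")).2
            (by omega), ihstr]
      have hcells : ∀ i ∈ PySem.List.pyRange 0 t 1,
          cellA ((PySem.List.pyRange u (t - u) 1).foldl (fillK t u)
            ((PySem.List.pyRange 0 (u:Int) 1).foldl (stepA t) (m0 t, "")).1) u i = cellB t u i := by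
        intro i hi
        obtain ⟨hi0, hit⟩ := PySem.List.mem_pyRange_one.mp hi
        have hv : pvGet2 ((PySem.List.pyRange u (t - u) 1).foldl (fillK t u)
            ((PySem.List.pyRange 0 (u:Int) 1).foldl (stepA t) (m0 t, "")).1) u i
            = pvLayer t u i + 1 := by
          rw [gtc u i (by omega) (by omega) hi0 hit]
          have hle : pvLayer t (u:Int) i ≤ (u:Int) := by unfold pvLayer; omega
          by_cases hw : ∃ k ∈ PySem.List.pyRange (↑u) (t - ↑u) 1,
              (u:Int) = ↑u ∧ i = k ∨ i = ↑u ∧ (u:Int) = k ∨ (u:Int) = t - ↑u - 1 ∧ i = k ∨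
                i = t - ↑u - 1 ∧ (u:Int) = k
          · have hlay := (written_iff_layer t u u i (by omega) (by omega) (by omega) hi0 hit).mp hw
            rw [if_pos hw]
            omega
          · have hlay : pvLayer t (u:Int) i ≠ (u:Int) :=
              fun h => hw ((written_iff_layer t u u i (by omega) (by omega) (by omega) hi0 hit).mpr h)
            rw [if_neg hw, ihg u i (by omega) (by omega) hi0 hit, if_pos (by omega)]
        unfold pvGet2 at hv
        simp only [cellA, cellB]
        rw [hv]
        have hmin : min (min (u:Int) i) (min (t - 1 - u) (t - 1 - i)) = pvLayer t u i := rfl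
        rw [hmin]
        split_ifs <;> rfl
      rw [List.map_congr_left hcells]
      simp only [List.map_cons, List.map_nil]
      rw [sjoin_empty_append, rowB]
      simp [String.append_assoc]

-- ===== VERDICT (by name: the statement is the Claim_ definition above) =====
theorem matriz_quadrada_spec : Claim_equal_matriz_quadrada := by
  intro t _
  unfold Spec_matriz_quadrada matriz_quadrada matriz_quadrada_alt
  by_cases hpos : 0 < t
  · have h := (outer_inv t hpos t.toNat (by omega)).2.2
    rwa [Int.toNat_of_nonneg (by omega : (0:Int) ≤ t)] at h
  · rw [PySem.List.pyRange_one_eq_nil (by omega)]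
    simp [sjoin_nil]
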